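-- pv_equiv track=rewrite | github.com/vesaakerman/silnlp | silnlp/common/paratext.py | strip_parens
-- ===== SOURCE A (Python) =====
-- def strip_parens(term_str: str) -> str:
--     parens: int = 0
--     end: int = -1
--     for i in reversed(range(len(term_str))):
--         c = term_str[i]
--         if c == ")":
--             if parens == 0:
--                 end = i + 1
--             parens += 1
--         elif c == "(":
--             parens -= 1
--             if parens == 0:
--                 term_str = term_str[:i] + term_str[end:]
--                 end = -1
--     return term_str
-- ===== SOURCE B (Python) =====
-- def strip_parens(term_str: str) -> str:
--     out = []
--     pending = []
--     parens = 0
--     for c in reversed(term_str):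
--         if c == ")":
--             if parens >= 0:
--                 pending.append(c)
--             else:
--                 out.append(c)
--             parens += 1
--         elif c == "(":
--             parens -= 1
--             if parens == 0:
--                 pending = []
--             elif parens > 0:
--                 pending.append(c)
--             else:
--                 out.append(c)
--         else:
--             if parens > 0:
--                 pending.append(c)
--             else:
--                 out.append(c)
--     out.extend(pending)
--     return "".join(reversed(out))
-- ===== Notes on version B (the rewrite author's own statement) =====
-- stated objective: alternative
-- what changed: A rescans and re-slices the whole remaining string each time a parenthesized group closes; B makes a single right-to-left pass with a depth counter, an output buffer and a pending-group buffer that is dropped when the group closes, then joins once.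
import Mathlib
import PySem

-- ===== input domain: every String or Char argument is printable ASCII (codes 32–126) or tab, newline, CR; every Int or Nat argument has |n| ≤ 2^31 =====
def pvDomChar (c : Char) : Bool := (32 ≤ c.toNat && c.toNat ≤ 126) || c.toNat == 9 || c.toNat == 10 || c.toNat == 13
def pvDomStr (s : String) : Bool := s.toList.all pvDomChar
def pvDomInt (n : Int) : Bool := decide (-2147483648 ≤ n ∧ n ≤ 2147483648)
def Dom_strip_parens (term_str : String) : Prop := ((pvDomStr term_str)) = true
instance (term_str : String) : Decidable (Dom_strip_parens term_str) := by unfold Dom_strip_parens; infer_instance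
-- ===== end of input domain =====

-- B replaces A's repeated string slicing (one re-concatenation per removed group) by a single
-- right-to-left pass with a depth counter and two buffers; objective: alternative (different algorithm).

-- ===== PORT A =====
-- One iteration of A's loop body at index i; state = (term_str, parens, end).
def stepA (st : List Char × Int × Int) (i : Nat) : List Char × Int × Int :=
  match PySem.List.pyGet? st.1 (i : Int) with
  | none => st  -- unreachable: i is always in range of the current string
  | some c =>
    if c = ')' then
      (st.1, st.2.1 + 1, if st.2.1 = 0 then (i : Int) + 1 else st.2.2)
    else if c = '(' then
      if st.2.1 - 1 = 0 then
        (PySem.List.slice st.1 none (some (i : Int)) ++ PySem.List.slice st.1 (some st.2.2) none,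
         st.2.1 - 1, -1)
      else
        (st.1, st.2.1 - 1, st.2.2)
    else st

-- 'for i in reversed(range(n))': process indices n-1, n-2, …, 0.
def loopA : Nat → (List Char × Int × Int) → (List Char × Int × Int)
  | 0, st => st
  | i + 1, st => loopA i (stepA st i)

def strip_parens (term_str : String) : String :=
  String.ofList (loopA term_str.toList.length (term_str.toList, 0, -1)).1

-- ===== PORT B =====
-- One iteration of B's loop body on char c; state = (out, pending, parens), out/pending in scan order.
def stepB (st : List Char × List Char × Int) (c : Char) : List Char × List Char × Int :=
  if c = ')' then
    if st.2.2 ≥ 0 then (st.1, st.2.1 ++ [c], st.2.2 + 1)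
    else (st.1 ++ [c], st.2.1, st.2.2 + 1)
  else if c = '(' then
    if st.2.2 - 1 = 0 then (st.1, [], st.2.2 - 1)
    else if st.2.2 - 1 > 0 then (st.1, st.2.1 ++ [c], st.2.2 - 1)
    else (st.1 ++ [c], st.2.1, st.2.2 - 1)
  else
    if st.2.2 > 0 then (st.1, st.2.1 ++ [c], st.2.2)
    else (st.1 ++ [c], st.2.1, st.2.2)

def strip_parens_alt (term_str : String) : String :=
  let st := term_str.toList.reverse.foldl stepB ([], [], 0)
  String.ofList ((st.1 ++ st.2.1).reverse)

-- ===== PRECONDITION & SPEC =====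
def Spec_strip_parens (term_str : String) (out : String) : Prop := out = strip_parens_alt term_str
instance (term_str : String) (out : String) : Decidable (Spec_strip_parens term_str out) := by unfold Spec_strip_parens; infer_instance

-- ===== CLAIM (what is proved, stated in full; the proofs are below) =====
def Claim_equal_strip_parens : Prop := ∀ (term_str : String), Dom_strip_parens term_str → Spec_strip_parens term_str (strip_parens term_str)

-- ===== LEMMAS AND PROOFS =====
theorem loopA_succ (n : Nat) (st : List Char × Int × Int) :
    loopA (n + 1) st = loopA n (stepA st n) := rfl

theorem drop_rev_len (out pending : List Char) :
    ((out ++ pending).reverse).drop pending.length = out.reverse := by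
  rw [List.reverse_append, ← List.length_reverse (as := pending)]
  exact List.drop_left

-- Main invariant: A's live string is pre ++ (out ++ pending).reverse, A's 'end' is pre.length +
-- pending.length while a group is open (parens ≥ 1) and -1 with pending empty otherwise.
theorem loopA_eq (pre : List Char) : ∀ (out pending : List Char) (p e : Int),
    ((1 ≤ p ∧ e = (pre.length : Int) + (pending.length : Int)) ∨ (p ≤ 0 ∧ e = -1 ∧ pending = [])) →
    (loopA pre.length (pre ++ (out ++ pending).reverse, p, e)).1
      = ((pre.reverse.foldl stepB (out, pending, p)).1
          ++ (pre.reverse.foldl stepB (out, pending, p)).2.1).reverse := by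
  induction pre using List.reverseRecOn with
  | nil => intro out pending p e _; simp [loopA]
  | append_singleton pre' c ih =>
    intro out pending p e hinv
    have hs : (pre' ++ [c]) ++ (out ++ pending).reverse = pre' ++ (c :: (out ++ pending).reverse) := by
      simp
    have hlen : (pre' ++ [c]).length = pre'.length + 1 := by simp
    rw [hlen, hs, loopA_succ]
    have hget : PySem.List.pyGet? (pre' ++ (c :: (out ++ pending).reverse)) ((pre'.length : Nat) : Int)
        = some c := PySem.List.pyGet?_append_length ..
    have hfold : (pre' ++ [c]).reverse.foldl stepB (out, pending, p)
        = pre'.reverse.foldl stepB (stepB (out, pending, p) c) := by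
      simp
    rw [hfold]
    by_cases hc1 : c = ')'
    · subst hc1
      rcases hinv with ⟨hp, he⟩ | ⟨hp, he, hpend⟩
      · -- open group: char joins pending, end unchanged
        have hp0 : ¬ (p = 0) := by omega
        have hstep : stepA (pre' ++ (')' :: (out ++ pending).reverse), p, e) pre'.length
            = (pre' ++ (')' :: (out ++ pending).reverse), p + 1, e) := by
          simp [stepA, hp0]
        have hB : stepB (out, pending, p) ')' = (out, pending ++ [')'], p + 1) := by
          simp [stepB]; omega
        have ht : pre' ++ (')' :: (out ++ pending).reverse)
            = pre' ++ (out ++ (pending ++ [')'])).reverse := by simp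
        rw [hstep, hB, ht]
        exact ih out (pending ++ [')']) (p + 1) e
          (Or.inl ⟨by omega, by simp at he ⊢; omega⟩)
      · subst hpend
        by_cases hp0 : p = 0
        · -- a new group opens here
          have hstep : stepA (pre' ++ (')' :: (out ++ ([] : List Char)).reverse), p, e) pre'.length
              = (pre' ++ (')' :: (out ++ ([] : List Char)).reverse), p + 1, (pre'.length : Int) + 1) := by
            simp [stepA, hp0]
          have hB : stepB (out, [], p) ')' = (out, [')'], p + 1) := by
            simp [stepB]; omega
          have ht : pre' ++ (')' :: (out ++ ([] : List Char)).reverse)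
              = pre' ++ (out ++ [')']).reverse := by simp
          rw [hstep, hB, ht]
          exact ih out [')'] (p + 1) _ (Or.inl ⟨by omega, by simp⟩)
        · -- p < 0: stray ')' is kept
          have hstep : stepA (pre' ++ (')' :: (out ++ ([] : List Char)).reverse), p, e) pre'.length
              = (pre' ++ (')' :: (out ++ ([] : List Char)).reverse), p + 1, e) := by
            simp [stepA, hp0]
          have hB : stepB (out, [], p) ')' = (out ++ [')'], [], p + 1) := by
            simp [stepB]; omega
          have ht : pre' ++ (')' :: (out ++ ([] : List Char)).reverse)
              = pre' ++ ((out ++ [')']) ++ ([] : List Char)).reverse := by simp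
          rw [hstep, hB, ht]
          exact ih (out ++ [')']) [] (p + 1) e (Or.inr ⟨by omega, he, rfl⟩)
    · by_cases hc2 : c = '('
      · subst hc2
        rcases hinv with ⟨hp, he⟩ | ⟨hp, he, hpend⟩
        · by_cases hp1 : p - 1 = 0
          · -- the open group closes: remove it
            have hE : e = (((pre'.length + 1 + pending.length : Nat) : Int)) := by
              simp at he; omega
            have htake : (pre' ++ ('(' :: (out ++ pending).reverse)).take pre'.length = pre' :=
              List.take_left
            have hdrop : (pre' ++ ('(' :: (out ++ pending).reverse)).drop
                (pre'.length + 1 + pending.length) = out.reverse := by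
              have hrw : pre' ++ ('(' :: (out ++ pending).reverse)
                  = (pre' ++ ['(']) ++ (out ++ pending).reverse := by simp
              rw [hrw, List.drop_append]
              have h1 : ((pre' ++ ['(']) : List Char).drop (pre'.length + 1 + pending.length)
                  = [] := by
                apply List.drop_eq_nil_of_le; simp
              rw [h1]
              have h2 : pre'.length + 1 + pending.length - ((pre' ++ ['(']) : List Char).length
                  = pending.length := by simp
              rw [h2, drop_rev_len, List.nil_append]
            have hstep : stepA (pre' ++ ('(' :: (out ++ pending).reverse), p, e) pre'.length
                = (pre' ++ out.reverse, p - 1, -1) := by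
              have hsl1 : PySem.List.slice (pre' ++ ('(' :: (out ++ pending).reverse)) none
                  (some ((pre'.length : Nat) : Int)) = pre' := by
                rw [PySem.List.slice_to_natCast]; exact htake
              have hsl2 : PySem.List.slice (pre' ++ ('(' :: (out ++ pending).reverse)) (some e)
                  none = out.reverse := by
                rw [hE, PySem.List.slice_from_natCast]; exact hdrop
              simp only [stepA, hget, reduceIte]
              rw [if_pos hp1, hsl1, hsl2, if_neg hc1]
            have hB : stepB (out, pending, p) '(' = (out, [], p - 1) := by
              simp [stepB, hp1]
            have ht : pre' ++ out.reverse = pre' ++ (out ++ ([] : List Char)).reverse := by simp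
            rw [hstep, hB, ht]
            exact ih out [] (p - 1) (-1) (Or.inr ⟨by omega, rfl, rfl⟩)
          · -- still inside the group
            have hstep : stepA (pre' ++ ('(' :: (out ++ pending).reverse), p, e) pre'.length
                = (pre' ++ ('(' :: (out ++ pending).reverse), p - 1, e) := by
              simp [stepA, hp1]
            have hB : stepB (out, pending, p) '(' = (out, pending ++ ['('], p - 1) := by
              simp [stepB, hp1]; omega
            have ht : pre' ++ ('(' :: (out ++ pending).reverse)
                = pre' ++ (out ++ (pending ++ ['('])).reverse := by simp
            rw [hstep, hB, ht]
            exact ih out (pending ++ ['(']) (p - 1) e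
              (Or.inl ⟨by omega, by simp at he ⊢; omega⟩)
        · -- p ≤ 0: stray '(' is kept
          subst hpend
          have hp1 : ¬ (p - 1 = 0) := by omega
          have hstep : stepA (pre' ++ ('(' :: (out ++ ([] : List Char)).reverse), p, e) pre'.length
              = (pre' ++ ('(' :: (out ++ ([] : List Char)).reverse), p - 1, e) := by
            simp [stepA, hp1]
          have hB : stepB (out, [], p) '(' = (out ++ ['('], [], p - 1) := by
            simp [stepB, hp1]; omega
          have ht : pre' ++ ('(' :: (out ++ ([] : List Char)).reverse)
              = pre' ++ ((out ++ ['(']) ++ ([] : List Char)).reverse := by simp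
          rw [hstep, hB, ht]
          exact ih (out ++ ['(']) [] (p - 1) e (Or.inr ⟨by omega, he, rfl⟩)
      · -- ordinary character
        have hstep : stepA (pre' ++ (c :: (out ++ pending).reverse), p, e) pre'.length
            = (pre' ++ (c :: (out ++ pending).reverse), p, e) := by
          simp [stepA, hc1, hc2]
        rw [hstep]
        rcases hinv with ⟨hp, he⟩ | ⟨hp, he, hpend⟩
        · have hB : stepB (out, pending, p) c = (out, pending ++ [c], p) := by
            simp [stepB, hc1, hc2]; omega
          have ht : pre' ++ (c :: (out ++ pending).reverse)
              = pre' ++ (out ++ (pending ++ [c])).reverse := by simp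
          rw [hB, ht]
          exact ih out (pending ++ [c]) p e
            (Or.inl ⟨hp, by simp at he ⊢; omega⟩)
        · subst hpend
          have hB : stepB (out, [], p) c = (out ++ [c], [], p) := by
            simp [stepB, hc1, hc2]; omega
          have ht : pre' ++ (c :: (out ++ ([] : List Char)).reverse)
              = pre' ++ ((out ++ [c]) ++ ([] : List Char)).reverse := by simp
          rw [hB, ht]
          exact ih (out ++ [c]) [] p e (Or.inr ⟨hp, he, rfl⟩)

-- ===== VERDICT (by name: the statement is the Claim_ definition above) =====
theorem strip_parens_spec : Claim_equal_strip_parens := by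
  intro s _
  unfold Spec_strip_parens strip_parens strip_parens_alt
  have h := loopA_eq s.toList [] [] 0 (-1) (Or.inr ⟨le_refl 0, rfl, rfl⟩)
  simp only [List.append_nil, List.reverse_nil] at h
  exact congrArg String.ofList h
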